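-- pv_equiv track=rewrite | github.com/jms7446/hackerrank | baekjoon/alg-study/w20/p3015.py | solve_org
-- ===== SOURCE A (Python) =====
-- def solve_org(n, xs):
--     count = 0
--     stack = []
--     for x in xs:
--         for i in reversed(range(len(stack))):
--             count += 1
--             if stack[i] > x:
--                 break
--             elif stack[i] < x:
--                 stack.pop()
--         stack.append(x)
--     return count
-- ===== SOURCE B (Python) =====
-- def solve_org(n, xs):
--     count = 0
--     stack = []  # groups (value, run_length), values strictly decreasing from bottom to top
--     for x in xs:
--         while stack and stack[-1][0] < x:
--             count += stack[-1][1]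
--             stack.pop()
--         if stack and stack[-1][0] == x:
--             c = stack.pop()[1]
--             count += c + (1 if stack else 0)
--             stack.append((x, c + 1))
--         else:
--             if stack:
--                 count += 1
--             stack.append((x, 1))
--     return count
-- ===== Notes on version B (the rewrite author's own statement) =====
-- stated objective: faster
-- what changed: Replaces A's per-element downward rescan of the raw stack (quadratic on runs of equal values) with a monotonic stack of (value, run-length) groups whose counts are aggregated on pop, making the whole scan amortized O(n).
import Mathlib
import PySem

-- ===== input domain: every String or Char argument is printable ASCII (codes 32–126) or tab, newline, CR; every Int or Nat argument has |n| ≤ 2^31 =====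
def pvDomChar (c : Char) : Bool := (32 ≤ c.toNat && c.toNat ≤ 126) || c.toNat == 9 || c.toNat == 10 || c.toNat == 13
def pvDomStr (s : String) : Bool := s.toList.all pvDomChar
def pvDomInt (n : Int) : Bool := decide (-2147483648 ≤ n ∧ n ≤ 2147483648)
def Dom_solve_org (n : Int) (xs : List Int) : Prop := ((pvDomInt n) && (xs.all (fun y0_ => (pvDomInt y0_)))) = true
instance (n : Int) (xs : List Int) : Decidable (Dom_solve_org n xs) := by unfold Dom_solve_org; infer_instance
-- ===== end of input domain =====

-- B replaces A's per-element downward rescan of the raw stack (quadratic on equal runs)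
-- with a monotonic stack of (value, run-length) groups, aggregating counts on pop: O(n).

-- ===== PORT A =====
-- inner loop 'for i in reversed(range(len(stack)))': fuel = number of remaining indices, i = fuel - 1
def solveInner (x : Int) : Nat → Int → List Int → Int × List Int
  | 0, count, stack => (count, stack)
  | i + 1, count, stack =>
      match PySem.List.pyGet? stack (i : Int) with
      | none => (count + 1, stack)          -- IndexError; unreachable (i is always in range)
      | some v =>
        if v > x then (count + 1, stack)    -- break
        else if v < x then
          match PySem.List.pop? stack with  -- stack.pop()
          | none => (count + 1, stack)      -- unreachable: stack is nonempty here
          | some (_, s) => solveInner x i (count + 1) s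
        else solveInner x i (count + 1) stack

def aStep (st : Int × List Int) (x : Int) : Int × List Int :=
  let r := solveInner x st.2.length st.1 st.2
  (r.1, r.2 ++ [x])                          -- stack.append(x)

def solve_org (_n : Int) (xs : List Int) : Int :=
  (xs.foldl aStep (0, [])).1

-- ===== PORT B =====
-- group stack held head-first: list head = Python's stack[-1] (top group)
def popLT (x : Int) : Int → List (Int × Int) → Int × List (Int × Int)
  | count, [] => (count, [])
  | count, (v, c) :: rest =>
      if v < x then popLT x (count + c) rest else (count, (v, c) :: rest)

def bStep (x : Int) (st : Int × List (Int × Int)) : Int × List (Int × Int) :=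
  match popLT x st.1 st.2 with
  | (count, []) => (count, [(x, 1)])
  | (count, (v, c) :: rest) =>
      if v == x then (count + c + (if rest.isEmpty then 0 else 1), (x, c + 1) :: rest)
      else (count + 1, (x, 1) :: (v, c) :: rest)

def solve_org_alt (_n : Int) (xs : List Int) : Int :=
  (xs.foldl (fun st x => bStep x st) (0, [])).1

-- ===== PRECONDITION & SPEC =====
def Spec_solve_org (n : Int) (xs : List Int) (out : Int) : Prop := out = solve_org_alt n xs
instance (n : Int) (xs : List Int) (out : Int) : Decidable (Spec_solve_org n xs out) := by unfold Spec_solve_org; infer_instance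

-- ===== CLAIM (what is proved, stated in full; the proofs are below) =====
def Claim_equal_solve_org : Prop := ∀ (n : Int) (xs : List Int), Dom_solve_org n xs → Spec_solve_org n xs (solve_org n xs)

-- ===== LEMMAS AND PROOFS =====

-- A's stack, reconstructed from B's group stack: concatenate the runs, oldest element first
def pvFlat : List (Int × Int) → List Int
  | [] => []
  | (v, c) :: rest => List.replicate c.toNat v ++ pvFlat rest

lemma pvFlat_cons_rev (v c : Int) (rest : List (Int × Int)) :
    (pvFlat ((v, c) :: rest)).reverse = (pvFlat rest).reverse ++ List.replicate c.toNat v := by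
  simp [pvFlat, List.reverse_append]

-- popping phase: c copies of v (< x) on top are popped, one count each
lemma popPhase (x v : Int) (hv : v < x) :
    ∀ (c : Nat) (pre : List Int) (count : Int),
      solveInner x (pre.length + c) count (pre ++ List.replicate c v)
        = solveInner x pre.length (count + c) pre
  | 0, pre, count => by simp
  | c + 1, pre, count => by
      have hf : pre.length + (c + 1) = (pre.length + c) + 1 := by omega
      have hx : (pre ++ List.replicate (c + 1) v)[pre.length + c]? = some v := by
        rw [List.getElem?_append_right (by omega)]
        simp
      rw [hf]
      simp only [solveInner, PySem.List.pyGet?_natCast, hx]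
      rw [if_neg (by omega : ¬ v > x), if_pos hv]
      have hp : PySem.List.pop? (pre ++ List.replicate (c + 1) v)
          = some (v, pre ++ List.replicate c v) := by
        rw [List.replicate_succ', ← List.append_assoc]
        exact PySem.List.pop?_last _ v
      rw [hp]
      simp only []
      rw [popPhase x v hv c pre (count + 1)]
      congr 1
      push_cast
      ring

-- equal phase: c entries equal to x are scanned (one count each) without change to the stack
lemma equalPhase (x : Int) :
    ∀ (c j : Nat) (S : List Int) (count : Int),
      (∀ k, j ≤ k → k < j + c → S[k]? = some x) →
      solveInner x (j + c) count S = solveInner x j (count + c) S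
  | 0, j, S, count, _ => by simp
  | c + 1, j, S, count, h => by
      have hx : S[j + c]? = some x := h (j + c) (by omega) (by omega)
      have hf : j + (c + 1) = (j + c) + 1 := by omega
      rw [hf]
      simp only [solveInner, PySem.List.pyGet?_natCast, hx]
      rw [if_neg (by omega : ¬ x > x), if_neg (by omega : ¬ x < x)]
      rw [equalPhase x c j S (count + 1) (fun k hk1 hk2 => h k hk1 (by omega))]
      congr 1
      push_cast
      ring

-- break: the element looked at is > x
lemma breakCase (x : Int) (j : Nat) (S : List Int) (count w : Int)
    (hS : S[j]? = some w) (hw : x < w) :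
    solveInner x (j + 1) count S = (count + 1, S) := by
  simp only [solveInner, PySem.List.pyGet?_natCast, hS]
  rw [if_pos hw]

-- one step of A on the flattened stack = one step of B, and B's invariants are preserved
lemma step_all (x : Int) (gs : List (Int × Int)) (count : Int)
    (hch : List.IsChain (fun p q : Int × Int => p.1 < q.1) gs)
    (hpos : ∀ p ∈ gs, 1 ≤ p.2) :
    aStep (count, (pvFlat gs).reverse) x
        = ((bStep x (count, gs)).1, (pvFlat (bStep x (count, gs)).2).reverse)
    ∧ List.IsChain (fun p q : Int × Int => p.1 < q.1) (bStep x (count, gs)).2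
    ∧ (∀ p ∈ (bStep x (count, gs)).2, 1 ≤ p.2) := by
  induction gs generalizing count with
  | nil =>
      refine ⟨?_, by simp [bStep, popLT], by simp [bStep, popLT]⟩
      simp [aStep, bStep, popLT, solveInner, pvFlat]
  | cons p rest ih =>
      obtain ⟨v, c⟩ := p
      have hc : 1 ≤ c := hpos (v, c) (by simp)
      have hcn : (c.toNat : Int) = c := Int.toNat_of_nonneg (by omega)
      have hstk := pvFlat_cons_rev v c rest
      rcases lt_trichotomy v x with hvx | hvx | hvx
      · -- v < x : the whole run is popped, then A behaves like a step on rest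
        have hB : bStep x (count, (v, c) :: rest) = bStep x (count + c, rest) := by
          simp [bStep, popLT, if_pos hvx]
        have hA : aStep (count, (pvFlat ((v, c) :: rest)).reverse) x
            = aStep (count + c, (pvFlat rest).reverse) x := by
          simp only [aStep, hstk, List.length_append, List.length_replicate]
          rw [popPhase x v hvx c.toNat ((pvFlat rest).reverse) count, hcn]
        obtain ⟨h1, h2, h3⟩ := ih (count + c) hch.tail (fun p hp => hpos p (by simp [hp]))
        rw [hA, hB]
        exact ⟨h1, h2, h3⟩
      · -- v = x : the run is scanned without popping, then break (or end of stack)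
        subst hvx
        have hS : ∀ k, ((pvFlat rest).reverse).length ≤ k →
            k < ((pvFlat rest).reverse).length + c.toNat →
            ((pvFlat rest).reverse ++ List.replicate c.toNat v)[k]? = some v := by
          intro k hk1 hk2
          rw [List.getElem?_append_right hk1, List.getElem?_replicate]
          rw [if_pos (by omega)]
        have heq := equalPhase v c.toNat ((pvFlat rest).reverse).length
          ((pvFlat rest).reverse ++ List.replicate c.toNat v) count
          (by simpa using hS)
        have hc1 : (c + 1).toNat = c.toNat + 1 := by omega
        rcases rest with _ | ⟨⟨w, d⟩, rs⟩
        · -- stack holds only the equal run: scanned to the bottom, no extra count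
          have hB : bStep v (count, [(v, c)]) = (count + c, [(v, c + 1)]) := by
            simp [bStep, popLT]
          rw [hB]
          refine ⟨?_, by simp, ?_⟩
          · have hA0 : (pvFlat [(v, c)]).reverse = List.replicate c.toNat v := by
              simp [pvFlat]
            have hA1 : (pvFlat [(v, c + 1)]).reverse
                = List.replicate c.toNat v ++ [v] := by
              simp [pvFlat, hc1]
              exact List.replicate_succ'
            have heq0 := equalPhase v c.toNat 0 (List.replicate c.toNat v) count
              (by intro k h1 h2; rw [List.getElem?_replicate]; rw [if_pos (by omega)])
            simp only [Nat.zero_add] at heq0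
            simp only [aStep, hA0, hA1, List.length_replicate]
            rw [heq0]
            simp only [solveInner]
            simp [hcn]
          · intro p hp
            simp at hp
            subst hp
            simp
            omega
        · -- a strictly larger group lies below: one more comparison, then break
          have hvw : v < w := (List.isChain_cons_cons.mp hch).1
          have hd : 1 ≤ d := hpos (w, d) (by simp)
          have hpre := pvFlat_cons_rev w d rs
          have hlen : ((pvFlat ((w, d) :: rs)).reverse).length
              = ((pvFlat rs).reverse).length + (d.toNat - 1) + 1 := by
            rw [hpre]; simp only [List.length_append, List.length_replicate]; omega
          have hgw : ((pvFlat ((w, d) :: rs)).reverse ++ List.replicate c.toNat v)[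
              ((pvFlat rs).reverse).length + (d.toNat - 1)]? = some w := by
            rw [List.getElem?_append_left (by omega), hpre,
              List.getElem?_append_right (by omega), List.getElem?_replicate]
            rw [if_pos (by omega)]
          have hbrk := breakCase v (((pvFlat rs).reverse).length + (d.toNat - 1))
            ((pvFlat ((w, d) :: rs)).reverse ++ List.replicate c.toNat v)
            (count + c.toNat) w hgw hvw
          have hB : bStep v (count, (v, c) :: (w, d) :: rs)
              = (count + c + 1, (v, c + 1) :: (w, d) :: rs) := by
            simp [bStep, popLT]
          rw [hB]
          refine ⟨?_, List.isChain_cons_cons.mpr ⟨hvw, (List.isChain_cons_cons.mp hch).2⟩,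
            ?_⟩
          · simp only [aStep, hstk, List.length_append, List.length_replicate]
            rw [heq, hlen, hbrk]
            rw [pvFlat_cons_rev v (c + 1) ((w, d) :: rs), hc1]
            simp [hcn, List.replicate_succ']
          · intro p hp
            simp at hp
            rcases hp with hp | hp | hp
            · subst hp; simp; omega
            · subst hp; exact hd
            · exact hpos p (by simp; tauto)
      · -- v > x : break at the first element looked at
        have hlen : ((pvFlat ((v, c) :: rest)).reverse).length
            = ((pvFlat rest).reverse).length + (c.toNat - 1) + 1 := by
          rw [hstk]; simp only [List.length_append, List.length_replicate]; omega
        have hgv : ((pvFlat ((v, c) :: rest)).reverse)[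
            ((pvFlat rest).reverse).length + (c.toNat - 1)]? = some v := by
          rw [hstk, List.getElem?_append_right (by omega), List.getElem?_replicate]
          rw [if_pos (by omega)]
        have hbrk := breakCase x (((pvFlat rest).reverse).length + (c.toNat - 1))
          ((pvFlat ((v, c) :: rest)).reverse) count v hgv hvx
        have hB : bStep x (count, (v, c) :: rest)
            = (count + 1, (x, 1) :: (v, c) :: rest) := by
          have : ¬ v == x := by simp; omega
          simp [bStep, popLT, if_neg (by omega : ¬ v < x), this]
        rw [hB]
        refine ⟨?_, List.isChain_cons_cons.mpr ⟨hvx, hch⟩, ?_⟩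
        · simp only [aStep]
          rw [hlen, hbrk]
          rw [pvFlat_cons_rev x 1 ((v, c) :: rest)]
          simp
        · intro p hp
          simp at hp
          rcases hp with hp | hp
          · subst hp; simp
          · exact hpos p (by simp; tauto)

lemma fold_eq (xs : List Int) :
    ∀ (count : Int) (gs : List (Int × Int)),
      List.IsChain (fun p q : Int × Int => p.1 < q.1) gs →
      (∀ p ∈ gs, 1 ≤ p.2) →
      (xs.foldl aStep (count, (pvFlat gs).reverse)).1
        = (xs.foldl (fun st x => bStep x st) (count, gs)).1 := by
  induction xs with
  | nil => intro count gs _ _; rfl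
  | cons x xs ih =>
      intro count gs hch hpos
      obtain ⟨heq, hch', hpos'⟩ := step_all x gs count hch hpos
      simp only [List.foldl_cons, heq]
      exact ih (bStep x (count, gs)).1 (bStep x (count, gs)).2 hch' hpos'

-- ===== VERDICT (by name: the statement is the Claim_ definition above) =====
theorem solve_org_spec : Claim_equal_solve_org := by
  intro n xs _
  show solve_org n xs = solve_org_alt n xs
  have h := fold_eq xs 0 [] (by simp) (by simp)
  exact h
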